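-- pv_equiv track=rewrite | github.com/DangoSys/buckyball | workflow/steps/doc-agent/summary_manager.py | _insert_entry
-- ===== SOURCE A (Python) =====
-- def _insert_entry(lines, new_entry):
--     """Insert new entry at appropriate position"""
--     new_lines = []
--     inserted = False
--
--     for line in lines:
--         new_lines.append(line)
--         if "contributors" in line.lower() and not inserted:
--             new_lines.insert(-1, new_entry["line"])
--             inserted = True
--
--     if not inserted:
--         new_lines.append(new_entry["line"])
--
--     return new_lines
-- ===== SOURCE B (Python) =====
-- def _insert_entry(lines, new_entry):
--     """Insert new entry before the first 'contributors' line (case-insensitive), else append."""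
--     new_line = new_entry["line"]
--     idx = next((i for i, ln in enumerate(lines) if "contributors" in ln.lower()), None)
--     if idx is None:
--         return lines + [new_line]
--     return lines[:idx] + [new_line] + lines[idx:]
-- ===== Notes on version B (the rewrite author's own statement) =====
-- stated objective: simpler
-- what changed: Replaces the flag-carrying copy loop with append-then-insert-at(-1) by a single index search followed by one slice splice.
import Mathlib
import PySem

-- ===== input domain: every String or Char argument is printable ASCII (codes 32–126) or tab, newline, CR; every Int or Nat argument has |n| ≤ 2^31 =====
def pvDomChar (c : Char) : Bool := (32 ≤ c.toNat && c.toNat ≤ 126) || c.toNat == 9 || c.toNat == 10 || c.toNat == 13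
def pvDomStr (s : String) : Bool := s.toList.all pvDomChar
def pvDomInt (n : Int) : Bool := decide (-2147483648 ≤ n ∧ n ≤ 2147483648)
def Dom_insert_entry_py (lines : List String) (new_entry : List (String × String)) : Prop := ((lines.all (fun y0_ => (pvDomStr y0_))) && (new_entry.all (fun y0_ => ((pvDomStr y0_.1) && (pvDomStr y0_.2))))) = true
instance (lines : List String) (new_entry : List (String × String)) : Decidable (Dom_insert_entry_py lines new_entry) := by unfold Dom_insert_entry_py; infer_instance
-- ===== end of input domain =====

-- B is simpler: one index search plus a slice splice instead of A's flag-carrying copy loop with insert-at-(-1).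

-- ===== PORT A =====
-- "contributors" in line.lower()
def pvMatch (line : String) : Bool := PySem.Str.isIn "contributors" (PySem.Str.lower line)

-- the for-loop of A: state = (new_lines, inserted)
def pvGoA (v : String) : List String → List String → Bool → List String
  | [], new_lines, inserted => if inserted then new_lines else new_lines ++ [v]
  | line :: rest, new_lines, inserted =>
      let new_lines' := new_lines ++ [line]
      if pvMatch line && !inserted then
        pvGoA v rest (PySem.List.insert new_lines' (-1) v) true
      else
        pvGoA v rest new_lines' inserted

def insert_entry_py (lines : List String) (new_entry : List (String × String)) : List String :=
  match (PySem.Dict.mk new_entry).get? "line" with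
  | none => []          -- KeyError in Python; excluded by Pre_
  | some v => pvGoA v lines [] false

-- ===== PORT B =====
-- find the insertion index, then splice by slicing
def pvSplice (v : String) (lines : List String) : List String :=
  match lines.findIdx? (fun ln => pvMatch ln) with
  | none => lines ++ [v]
  | some i => lines.take i ++ v :: lines.drop i

def insert_entry_py_alt (lines : List String) (new_entry : List (String × String)) : List String :=
  match (PySem.Dict.mk new_entry).get? "line" with
  | none => []          -- KeyError in Python; excluded by Pre_
  | some v => pvSplice v lines

-- ===== PRECONDITION & SPEC =====
-- A raises KeyError when new_entry has no "line" key; Pre_ requires the key to be present.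
def Pre_insert_entry_py (lines : List String) (new_entry : List (String × String)) : Prop :=
  (PySem.Dict.mk new_entry).contains "line" = true
instance (lines : List String) (new_entry : List (String × String)) : Decidable (Pre_insert_entry_py lines new_entry) := by unfold Pre_insert_entry_py; infer_instance
def pvWitness_insert_entry_py : List String × (List (String × String)) :=
  (["# Readme", "## Contributors", "- alice"], [("line", "- bob")])

def Spec_insert_entry_py (lines : List String) (new_entry : List (String × String)) (out : List String) : Prop := out = insert_entry_py_alt lines new_entry
instance (lines : List String) (new_entry : List (String × String)) (out : List String) : Decidable (Spec_insert_entry_py lines new_entry out) := by unfold Spec_insert_entry_py; infer_instance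

-- ===== CLAIM (what is proved, stated in full; the proofs are below) =====
def Claim_equal_insert_entry_py : Prop := ∀ (lines : List String) (new_entry : List (String × String)), Dom_insert_entry_py lines new_entry → Pre_insert_entry_py lines new_entry → Spec_insert_entry_py lines new_entry (insert_entry_py lines new_entry)

-- ===== LEMMAS AND PROOFS =====

-- list.insert(-1, v) on a nonempty list puts v before the last element
lemma pv_insert_neg_one (acc : List String) (l v : String) :
    PySem.List.insert (acc ++ [l]) (-1) v = acc ++ [v, l] := by
  simp [PySem.List.insert, PySem.List.sliceIndices]

-- once inserted=True the loop just copies the remaining lines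
lemma pvGoA_true (v : String) (rest acc : List String) :
    pvGoA v rest acc true = acc ++ rest := by
  induction rest generalizing acc with
  | nil => simp [pvGoA]
  | cons l t ih => simp [pvGoA, ih]

-- splicing past a non-matching head
lemma pvSplice_cons_not (v l : String) (t : List String) (h : pvMatch l = false) :
    pvSplice v (l :: t) = l :: pvSplice v t := by
  unfold pvSplice
  cases hfi : t.findIdx? (fun ln => pvMatch ln) <;>
    simp [List.findIdx?_cons, h, hfi]

-- the not-yet-inserted loop produces acc ++ splice
lemma pvGoA_false (v : String) (rest acc : List String) :
    pvGoA v rest acc false = acc ++ pvSplice v rest := by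
  induction rest generalizing acc with
  | nil => simp [pvGoA, pvSplice]
  | cons l t ih =>
    by_cases h : pvMatch l = true
    · simp only [pvGoA, h, Bool.not_false, Bool.and_self, if_pos]
      rw [pv_insert_neg_one, pvGoA_true]
      unfold pvSplice
      simp [List.findIdx?_cons, h]
    · have h' : pvMatch l = false := by simpa using h
      simp only [pvGoA, h', Bool.false_and, if_neg (Bool.false_ne_true)]
      rw [ih, pvSplice_cons_not v l t h']
      simp

-- ===== VERDICT (by name: the statement is the Claim_ definition above) =====
theorem insert_entry_py_spec : Claim_equal_insert_entry_py := by
  intro lines new_entry _ hpre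
  unfold Spec_insert_entry_py insert_entry_py insert_entry_py_alt
  cases hg : (PySem.Dict.mk new_entry).get? "line" with
  | none =>
    exfalso
    have := hpre
    unfold Pre_insert_entry_py at this
    rw [PySem.Dict.contains_eq_isSome_get?] at this
    simp [hg] at this
  | some v =>
    simpa using pvGoA_false v lines []
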